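-- pv_equiv track=rewrite | github.com/uridolan77/socrates_ns | src/orchestration/application_processor.py | _combine_rules
-- ===== SOURCE A (Python) =====
-- def _combine_rules(static_rules, dynamic_rules, generated_rules):
--     """Combine rules, handling conflicts with priority order"""
--     # Implementation similar to DynamicTextPatternRules._combine_rules
--     all_rules = []
--     rule_ids = set()
--
--     # Add generated rules (lowest priority)
--     for rule in generated_rules:
--         rule_id = rule.get('id')
--         if rule_id not in rule_ids:
--             all_rules.append(rule)
--             rule_ids.add(rule_id)
--
--     # Add static rules (middle priority)
--     for rule in static_rules:
--         rule_id = rule.get('id')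
--         if rule_id not in rule_ids:
--             all_rules.append(rule)
--             rule_ids.add(rule_id)
--         else:
--             # Replace generated rule with static rule
--             for i, existing_rule in enumerate(all_rules):
--                 if existing_rule.get('id') == rule_id:
--                     all_rules[i] = rule
--                     break
--
--     # Add dynamic rules (highest priority)
--     for rule in dynamic_rules:
--         rule_id = rule.get('id')
--         if rule_id not in rule_ids:
--             all_rules.append(rule)
--             rule_ids.add(rule_id)
--         else:
--             # Replace existing rule with dynamic rule
--             for i, existing_rule in enumerate(all_rules):
--                 if existing_rule.get('id') == rule_id:
--                     all_rules[i] = rule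
--                     break
--
--     return all_rules
-- ===== SOURCE B (Python) =====
-- def _combine_rules(static_rules, dynamic_rules, generated_rules):
--     """Combine rules, handling conflicts with priority order."""
--     merged = {}  # id -> rule, insertion-ordered
--     # Generated rules: lowest priority, first occurrence of an id wins
--     for rule in generated_rules:
--         rid = rule.get('id')
--         if rid not in merged:
--             merged[rid] = rule
--     # Static then dynamic rules: overwrite in place (dict keeps the key's
--     # position), append if the id is new
--     for rule in static_rules:
--         merged[rule.get('id')] = rule
--     for rule in dynamic_rules:
--         merged[rule.get('id')] = rule
--     return list(merged.values())
-- ===== Notes on version B (the rewrite author's own statement) =====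
-- stated objective: idiomatic
-- what changed: Replaces the list+id-set with nested replacement scans by a single insertion-ordered dict id->rule: first-wins insert for generated rules, unconditional overwrite (which keeps the key's position) for static and dynamic rules, returning list(merged.values()).
import Mathlib
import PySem

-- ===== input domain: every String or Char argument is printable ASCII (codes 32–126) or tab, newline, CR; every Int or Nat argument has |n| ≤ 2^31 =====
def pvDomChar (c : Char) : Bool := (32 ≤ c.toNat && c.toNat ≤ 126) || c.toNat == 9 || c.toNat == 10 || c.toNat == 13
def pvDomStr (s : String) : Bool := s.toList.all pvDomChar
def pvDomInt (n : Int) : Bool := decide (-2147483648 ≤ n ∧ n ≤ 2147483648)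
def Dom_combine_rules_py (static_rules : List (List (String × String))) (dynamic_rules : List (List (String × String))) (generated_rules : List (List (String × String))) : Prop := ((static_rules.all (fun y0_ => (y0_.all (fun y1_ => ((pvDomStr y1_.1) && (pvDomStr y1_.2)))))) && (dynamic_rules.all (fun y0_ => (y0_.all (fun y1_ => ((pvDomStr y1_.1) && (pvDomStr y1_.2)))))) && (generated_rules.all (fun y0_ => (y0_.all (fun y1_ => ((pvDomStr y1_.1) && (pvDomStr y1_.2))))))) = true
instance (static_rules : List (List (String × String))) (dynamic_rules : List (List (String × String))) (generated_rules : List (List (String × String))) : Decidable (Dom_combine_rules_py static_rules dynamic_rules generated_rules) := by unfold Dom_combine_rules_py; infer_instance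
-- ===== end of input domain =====

-- ===== PORT A =====
-- B is the idiomatic rewrite: one insertion-ordered dict replaces the list + id-set + nested replacement scans.
-- rule.get('id') on the rule dict (association list)
def pvRuleId (r : List (String × String)) : Option String :=
  (PySem.Dict.mk r).get? "id"

-- inner 'for i, existing_rule in enumerate(all_rules): if …: all_rules[i] = rule; break'
def pvReplaceFirst (rid : Option String) (rule : List (String × String)) :
    List (List (String × String)) → List (List (String × String))
  | [] => []
  | x :: xs => if pvRuleId x == rid then rule :: xs else x :: pvReplaceFirst rid rule xs

-- generated-rules loop body
def pvAddGen (s : List (List (String × String)) × PySem.Set (Option String))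
    (rule : List (String × String)) :
    List (List (String × String)) × PySem.Set (Option String) :=
  let rid := pvRuleId rule
  if PySem.Set.contains s.2 rid then s else (s.1 ++ [rule], PySem.Set.add s.2 rid)

-- static/dynamic-rules loop body (append if new, else replace first match)
def pvAddOverride (s : List (List (String × String)) × PySem.Set (Option String))
    (rule : List (String × String)) :
    List (List (String × String)) × PySem.Set (Option String) :=
  let rid := pvRuleId rule
  if PySem.Set.contains s.2 rid then (pvReplaceFirst rid rule s.1, s.2)
  else (s.1 ++ [rule], PySem.Set.add s.2 rid)

def combine_rules_py (static_rules : List (List (String × String))) (dynamic_rules : List (List (String × String))) (generated_rules : List (List (String × String))) : List (List (String × String)) :=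
  let s1 := generated_rules.foldl pvAddGen ([], PySem.Set.empty)
  let s2 := static_rules.foldl pvAddOverride s1
  let s3 := dynamic_rules.foldl pvAddOverride s2
  s3.1

-- ===== PORT B =====
-- 'if rid not in merged: merged[rid] = rule'
def pvMergeGen (d : PySem.Dict (Option String) (List (String × String)))
    (rule : List (String × String)) : PySem.Dict (Option String) (List (String × String)) :=
  let rid := pvRuleId rule
  if d.contains rid then d else d.insert rid rule

-- 'merged[rule.get('id')] = rule'
def pvMergePut (d : PySem.Dict (Option String) (List (String × String)))
    (rule : List (String × String)) : PySem.Dict (Option String) (List (String × String)) :=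
  d.insert (pvRuleId rule) rule

def combine_rules_py_alt (static_rules : List (List (String × String))) (dynamic_rules : List (List (String × String))) (generated_rules : List (List (String × String))) : List (List (String × String)) :=
  let m1 := generated_rules.foldl pvMergeGen PySem.Dict.empty
  let m2 := static_rules.foldl pvMergePut m1
  let m3 := dynamic_rules.foldl pvMergePut m2
  m3.values

-- ===== PRECONDITION & SPEC =====
def Spec_combine_rules_py (static_rules : List (List (String × String))) (dynamic_rules : List (List (String × String))) (generated_rules : List (List (String × String))) (out : List (List (String × String))) : Prop := out = combine_rules_py_alt static_rules dynamic_rules generated_rules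
instance (static_rules : List (List (String × String))) (dynamic_rules : List (List (String × String))) (generated_rules : List (List (String × String))) (out : List (List (String × String))) : Decidable (Spec_combine_rules_py static_rules dynamic_rules generated_rules out) := by unfold Spec_combine_rules_py; infer_instance

-- ===== CLAIM (what is proved, stated in full; the proofs are below) =====
def Claim_equal_combine_rules_py : Prop := ∀ (static_rules : List (List (String × String))) (dynamic_rules : List (List (String × String))) (generated_rules : List (List (String × String))), Dom_combine_rules_py static_rules dynamic_rules generated_rules → Spec_combine_rules_py static_rules dynamic_rules generated_rules (combine_rules_py static_rules dynamic_rules generated_rules)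

-- ===== LEMMAS AND PROOFS =====

-- dict entry a rule contributes: (its id, the rule itself)
def pvEntry (r : List (String × String)) : Option String × List (String × String) :=
  (pvRuleId r, r)

-- loop invariant tying A's (all_rules, rule_ids) to B's merged dict
def pvInv (all : List (List (String × String))) (ids : PySem.Set (Option String))
    (d : PySem.Dict (Option String) (List (String × String))) : Prop :=
  ids = all.map pvRuleId ∧ (all.map pvRuleId).Nodup ∧ d.items = all.map pvEntry

theorem pvEntry_fst (r : List (String × String)) : (pvEntry r).1 = pvRuleId r := rfl

theorem pvKeys_of_inv (all : List (List (String × String)))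
    (d : PySem.Dict (Option String) (List (String × String)))
    (h : d.items = all.map pvEntry) : d.keys = all.map pvRuleId := by
  simp only [PySem.Dict.keys, h, List.map_map]
  rfl

theorem pvReplaceFirst_map (rid : Option String) (rule : List (String × String))
    (hr : pvRuleId rule = rid) (all : List (List (String × String)))
    (hnd : (all.map pvRuleId).Nodup) :
    (pvReplaceFirst rid rule all).map pvEntry
      = (all.map pvEntry).map (fun p => if p.1 == rid then (rid, rule) else p) := by
  induction all with
  | nil => rfl
  | cons x xs ih =>
    simp only [List.map_cons, List.nodup_cons] at hnd ⊢
    by_cases hx : pvRuleId x = rid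
    · have hnot : ∀ r ∈ xs, pvRuleId r ≠ rid := by
        intro r hrm hEq
        exact hnd.1 (hx ▸ hEq ▸ List.mem_map_of_mem hrm)
      simp only [pvReplaceFirst, hx, beq_self_eq_true, if_pos, pvEntry_fst, List.map_cons]
      refine List.cons_eq_cons.mpr ⟨by simp [pvEntry, hr], ?_⟩
      rw [List.map_congr_left (g := id) (fun p hp => ?_), List.map_id]
      obtain ⟨r, hrm, hpe⟩ := List.mem_map.mp hp
      have hne : p.1 ≠ rid := by rw [← hpe, pvEntry_fst]; exact hnot r hrm
      simp [beq_eq_false_iff_ne.mpr hne]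
    · have hbx : (pvRuleId x == rid) = false := beq_eq_false_iff_ne.mpr hx
      simp only [pvReplaceFirst, hbx, if_neg, Bool.false_eq_true, not_false_iff,
        List.map_cons, pvEntry_fst]
      refine List.cons_eq_cons.mpr ⟨by simp [pvEntry], ih hnd.2⟩

theorem pvReplaceFirst_ids (rid : Option String) (rule : List (String × String))
    (hr : pvRuleId rule = rid) (all : List (List (String × String))) :
    (pvReplaceFirst rid rule all).map pvRuleId = all.map pvRuleId := by
  induction all with
  | nil => rfl
  | cons x xs ih =>
    by_cases hx : pvRuleId x = rid
    · simp [pvReplaceFirst, hx, hr]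
    · simp [pvReplaceFirst, beq_eq_false_iff_ne.mpr hx, ih]

theorem pvGen_fold (l : List (List (String × String)))
    (s : List (List (String × String)) × PySem.Set (Option String))
    (d : PySem.Dict (Option String) (List (String × String)))
    (h : pvInv s.1 s.2 d) :
    pvInv (l.foldl pvAddGen s).1 (l.foldl pvAddGen s).2 (l.foldl pvMergeGen d) := by
  induction l generalizing s d with
  | nil => exact h
  | cons r rest ih =>
    obtain ⟨h1, h2, h3⟩ := h
    have hk := pvKeys_of_inv s.1 d h3
    simp only [List.foldl_cons]
    by_cases hm : pvRuleId r ∈ s.1.map pvRuleId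
    · have hs : PySem.Set.contains s.2 (pvRuleId r) = true := by
        rw [h1]; simpa using hm
      have hd : d.contains (pvRuleId r) = true := by
        rw [PySem.Dict.contains_eq_decide_mem_keys, hk]; simpa using hm
      simp only [pvAddGen, pvMergeGen, hs, hd, if_pos]
      exact ih s d ⟨h1, h2, h3⟩
    · have hs : PySem.Set.contains s.2 (pvRuleId r) = false := by
        rw [h1]; simpa using hm
      have hd : d.contains (pvRuleId r) = false := by
        rw [PySem.Dict.contains_eq_decide_mem_keys, hk]; simpa using hm
      simp only [pvAddGen, pvMergeGen, hs, hd, Bool.false_eq_true, if_neg, not_false_iff]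
      apply ih
      refine ⟨?_, ?_, ?_⟩
      · rw [PySem.Set.add_of_not_mem (h1 ▸ hm)]
        simp [h1]
      · simp only [List.map_append, List.map_cons, List.map_nil]
        exact List.Nodup.append h2 (List.nodup_singleton _)
          (by intro a ha hb; simp at hb; exact hm (hb ▸ ha))
      · rw [PySem.Dict.items_insert_of_not_contains _ _ hd, h3]
        simp [pvEntry]

theorem pvOver_fold (l : List (List (String × String)))
    (s : List (List (String × String)) × PySem.Set (Option String))
    (d : PySem.Dict (Option String) (List (String × String)))
    (h : pvInv s.1 s.2 d) :
    pvInv (l.foldl pvAddOverride s).1 (l.foldl pvAddOverride s).2 (l.foldl pvMergePut d) := by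
  induction l generalizing s d with
  | nil => exact h
  | cons r rest ih =>
    obtain ⟨h1, h2, h3⟩ := h
    have hk := pvKeys_of_inv s.1 d h3
    simp only [List.foldl_cons]
    by_cases hm : pvRuleId r ∈ s.1.map pvRuleId
    · have hs : PySem.Set.contains s.2 (pvRuleId r) = true := by
        rw [h1]; simpa using hm
      have hd : d.contains (pvRuleId r) = true := by
        rw [PySem.Dict.contains_eq_decide_mem_keys, hk]; simpa using hm
      simp only [pvAddOverride, pvMergePut, hs, if_pos]
      apply ih
      refine ⟨?_, ?_, ?_⟩
      · rw [h1, pvReplaceFirst_ids _ _ rfl]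
      · rw [pvReplaceFirst_ids _ _ rfl]; exact h2
      · rw [PySem.Dict.items_insert_of_contains _ _ hd, h3,
          pvReplaceFirst_map _ _ rfl s.1 h2]
    · have hs : PySem.Set.contains s.2 (pvRuleId r) = false := by
        rw [h1]; simpa using hm
      have hd : d.contains (pvRuleId r) = false := by
        rw [PySem.Dict.contains_eq_decide_mem_keys, hk]; simpa using hm
      simp only [pvAddOverride, pvMergePut, hs, Bool.false_eq_true, if_neg, not_false_iff]
      apply ih
      refine ⟨?_, ?_, ?_⟩
      · rw [PySem.Set.add_of_not_mem (h1 ▸ hm)]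
        simp [h1]
      · simp only [List.map_append, List.map_cons, List.map_nil]
        exact List.Nodup.append h2 (List.nodup_singleton _)
          (by intro a ha hb; simp at hb; exact hm (hb ▸ ha))
      · rw [PySem.Dict.items_insert_of_not_contains _ _ hd, h3]
        simp [pvEntry]

-- ===== VERDICT (by name: the statement is the Claim_ definition above) =====
theorem combine_rules_py_spec : Claim_equal_combine_rules_py := by
  intro static_rules dynamic_rules generated_rules _
  unfold Spec_combine_rules_py combine_rules_py combine_rules_py_alt
  have h1 := pvGen_fold generated_rules ([], PySem.Set.empty) PySem.Dict.empty
    ⟨rfl, List.nodup_nil, rfl⟩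
  have h2 := pvOver_fold static_rules _ _ h1
  have h3 := pvOver_fold dynamic_rules _ _ h2
  obtain ⟨-, -, hitems⟩ := h3
  show _ = PySem.Dict.values _
  simp only [PySem.Dict.values, hitems, List.map_map]
  exact (List.map_id _).symm.trans (List.map_congr_left (fun r _ => rfl))
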